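-- pv_equiv track=rewrite | github.com/LeiLiLab/InfiniSST | retriever/gigaspeech/handle_train_dataset_for_wordlings_v2.py | compute_clip_groups
-- ===== SOURCE A (Python) =====
-- import math
-- from typing import Dict, Iterable, List, Optional, Tuple
--
-- def compute_clip_groups(zh_tokens: List[str], clip_count: int) -> Tuple[int, List[List[str]]]:
--     if clip_count <= 0:
--         return 0, []
--     multiple_number = max(1, math.ceil(len(zh_tokens) / clip_count)) if zh_tokens else 1
--     groups: List[List[str]] = []
--     for i in range(clip_count):
--         start = i * multiple_number
--         end = (i + 1) * multiple_number
--         groups.append(zh_tokens[start:end])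
--     return multiple_number, groups
-- ===== SOURCE B (Python) =====
-- from typing import List, Tuple
--
--
-- def compute_clip_groups(zh_tokens: List[str], clip_count: int) -> Tuple[int, List[List[str]]]:
--     if clip_count <= 0:
--         return 0, []
--     multiple_number = (len(zh_tokens) + clip_count - 1) // clip_count if zh_tokens else 1
--     groups: List[List[str]] = []
--     current: List[str] = []
--     for tok in zh_tokens:
--         current.append(tok)
--         if len(current) == multiple_number:
--             groups.append(current)
--             current = []
--     if current:
--         groups.append(current)
--     while len(groups) < clip_count:
--         groups.append([])
--     return multiple_number, groups
-- ===== Notes on version B (the rewrite author's own statement) =====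
-- stated objective: alternative
-- what changed: B computes the chunk size by integer ceiling division instead of float math.ceil and replaces A's index-arithmetic slicing loop (zh_tokens[i*m:(i+1)*m]) by a single accumulator pass over the tokens that closes the current chunk whenever it reaches the chunk size, then pads with empty groups up to clip_count.
import Mathlib
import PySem

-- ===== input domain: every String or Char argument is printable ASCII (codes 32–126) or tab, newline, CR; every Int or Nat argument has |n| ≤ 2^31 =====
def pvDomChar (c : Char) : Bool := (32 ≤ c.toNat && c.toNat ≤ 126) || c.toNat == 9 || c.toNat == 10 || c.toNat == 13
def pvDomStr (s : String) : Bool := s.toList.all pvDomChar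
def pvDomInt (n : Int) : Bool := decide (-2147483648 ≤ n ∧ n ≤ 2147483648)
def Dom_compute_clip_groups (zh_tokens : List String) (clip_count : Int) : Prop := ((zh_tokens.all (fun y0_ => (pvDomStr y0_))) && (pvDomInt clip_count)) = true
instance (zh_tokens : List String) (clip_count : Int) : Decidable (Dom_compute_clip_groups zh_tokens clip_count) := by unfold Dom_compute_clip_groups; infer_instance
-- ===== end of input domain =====

-- B computes the chunk size by integer ceiling division and builds the groups in one accumulator
-- pass over the tokens (close the current chunk when it reaches the chunk size, then pad with
-- empty groups) instead of A's index-arithmetic slicing loop; same cost, different decomposition.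

-- ===== PORT A =====
-- math.ceil(len(zh_tokens) / clip_count) is ported as exact ceiling division -((-len) // clip_count);
-- exact on Dom (lengths and counts far below the float-precision threshold 2^53).
def compute_clip_groups (zh_tokens : List String) (clip_count : Int) : Int × List (List String) :=
  if clip_count ≤ 0 then (0, [])
  else
    let multiple_number : Int :=
      if zh_tokens = [] then 1
      else max 1 (-(PySem.Int.floordiv (-(zh_tokens.length : Int)) clip_count))
    let groups : List (List String) :=
      (PySem.List.pyRange 0 clip_count 1).foldl
        (fun gs i =>
          gs ++ [PySem.List.slice zh_tokens (some (i * multiple_number)) (some ((i + 1) * multiple_number))])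
        []
    (multiple_number, groups)

-- ===== PORT B =====
-- the loop body of Source B's 'for tok in zh_tokens': append tok to current, close the chunk when full
def pvStep (m : Int) (st : List (List String) × List String) (tok : String) :
    List (List String) × List String :=
  let cur := st.2 ++ [tok]
  if (cur.length : Int) = m then (st.1 ++ [cur], []) else (st.1, cur)

def compute_clip_groups_alt (zh_tokens : List String) (clip_count : Int) : Int × List (List String) :=
  if clip_count ≤ 0 then (0, [])
  else
    let multiple_number : Int :=
      if zh_tokens = [] then 1
      else PySem.Int.floordiv ((zh_tokens.length : Int) + clip_count - 1) clip_count
    let st := zh_tokens.foldl (pvStep multiple_number) ([], [])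
    let groups := if st.2 = [] then st.1 else st.1 ++ [st.2]
    -- the 'while len(groups) < clip_count: groups.append([])' loop runs exactly
    -- (clip_count - len(groups)) times; ported as appending that many empty lists — exact
    (multiple_number, groups ++ List.replicate ((clip_count - (groups.length : Int)).toNat) [])

-- ===== PRECONDITION & SPEC =====
def Spec_compute_clip_groups (zh_tokens : List String) (clip_count : Int) (out : Int × List (List String)) : Prop := out = compute_clip_groups_alt zh_tokens clip_count
instance (zh_tokens : List String) (clip_count : Int) (out : Int × List (List String)) : Decidable (Spec_compute_clip_groups zh_tokens clip_count out) := by unfold Spec_compute_clip_groups; infer_instance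

-- ===== CLAIM =====
def Claim_equal_compute_clip_groups : Prop := ∀ (zh_tokens : List String) (clip_count : Int), Dom_compute_clip_groups zh_tokens clip_count → Spec_compute_clip_groups zh_tokens clip_count (compute_clip_groups zh_tokens clip_count)

-- ===== LEMMAS AND PROOFS =====

theorem pv_foldl_append_map {α β : Type} (l : List α) (f : α → β) (acc : List β) :
    l.foldl (fun gs i => gs ++ [f i]) acc = acc ++ l.map f := by
  induction l generalizing acc with
  | nil => simp
  | cons x xs ih => simp [List.foldl_cons, ih]

-- A's ceiling via float ceil of n/c equals B's (n + c - 1) // c, and the max 1 is redundant for n ≥ 1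
theorem pv_m_eq (n : Nat) (c : Int) (hn : 1 ≤ n) (hc : 0 < c) :
    max 1 (-(PySem.Int.floordiv (-(n : Int)) c)) = PySem.Int.floordiv ((n : Int) + c - 1) c := by
  set q := PySem.Int.floordiv ((n : Int) + c - 1) c with hq
  have hspec : q * c ≤ (n : Int) + c - 1 ∧ (n : Int) + c - 1 < (q + 1) * c := by
    exact (PySem.Int.floordiv_eq_iff_of_pos hc).mp hq.symm
  have hq1 : 1 ≤ q := by nlinarith [hspec.1, hspec.2]
  have hceil : -(PySem.Int.floordiv (-(n : Int)) c) = q := by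
    rw [PySem.Int.neg_floordiv_neg_eq_iff_of_pos hc]
    constructor
    · nlinarith [hspec.2]
    · nlinarith [hspec.1]
  rw [hceil, max_eq_right hq1]

-- appending one element does not change a chunk wholly inside ys
theorem pv_chunk_snoc (ys : List String) (a : String) (M k : Nat) (h : k * M + M ≤ ys.length) :
    (((ys ++ [a]).drop (k * M)).take M) = ((ys.drop (k * M)).take M) := by
  rw [List.drop_append_of_le_length (by omega)]
  exact List.take_append_of_le_length (by rw [List.length_drop]; omega)

-- the accumulator pass computes the full chunks and the running remainder
theorem pv_fold (M : Nat) (hM : 0 < M) (xs : List String) :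
    xs.foldl (pvStep (M : Int)) ([], []) =
      ((List.range (xs.length / M)).map (fun k => (xs.drop (k * M)).take M),
       xs.drop (xs.length / M * M)) := by
  induction xs using List.reverseRecOn with
  | nil => simp [Nat.zero_div]
  | append_singleton ys a ih =>
      rw [List.foldl_append, ih]
      simp only [List.foldl_cons, List.foldl_nil, pvStep]
      have hqm : ys.length / M * M + ys.length % M = ys.length := by
        rw [Nat.mul_comm]; exact Nat.div_add_mod ys.length M
      have hmod : ys.length % M < M := Nat.mod_lt ys.length hM
      have hremlen : (ys.drop (ys.length / M * M)).length = ys.length % M := by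
        rw [List.length_drop]; omega
      have hlen : (ys ++ [a]).length = ys.length + 1 := by simp
      by_cases hfull : ys.length % M + 1 = M
      · have hcond : (((ys.drop (ys.length / M * M) ++ [a]).length : Int)) = (M : Int) := by
          have h0 : (ys.drop (ys.length / M * M) ++ [a]).length = M := by
            rw [List.length_append, hremlen]; simp; omega
          exact_mod_cast h0
        rw [if_pos hcond]
        have hdiv : (ys.length + 1) / M = ys.length / M + 1 := by
          have he : ys.length + 1 = (ys.length / M + 1) * M := by
            rw [Nat.add_mul, Nat.one_mul]; omega
          rw [he, Nat.mul_div_cancel _ hM]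
        rw [hlen, hdiv]
        refine Prod.ext ?_ ?_
        · simp only
          rw [List.range_succ, List.map_append, List.map_cons, List.map_nil]
          congr 1
          · apply List.map_congr_left
            intro k hk
            rw [List.mem_range] at hk
            exact (pv_chunk_snoc ys a M k (by
              have h2 : (k + 1) * M ≤ ys.length / M * M :=
                Nat.mul_le_mul_right _ (by omega)
              rw [Nat.add_mul, Nat.one_mul] at h2
              omega)).symm
          · rw [List.drop_append_of_le_length (by omega)]
            congr 1
            exact (List.take_of_length_le (by
              rw [List.length_append, hremlen]; simp; omega)).symm
        · simp only
          symm
          apply List.drop_eq_nil_of_le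
          rw [hlen, Nat.add_mul, Nat.one_mul]
          omega
      · have hcond : ¬ (((ys.drop (ys.length / M * M) ++ [a]).length : Int)) = (M : Int) := by
          have h0 : (ys.drop (ys.length / M * M) ++ [a]).length ≠ M := by
            rw [List.length_append, hremlen]; simp; omega
          exact fun hx => h0 (by exact_mod_cast hx)
        rw [if_neg hcond]
        have hdiv : (ys.length + 1) / M = ys.length / M := by
          have h1 : ys.length + 1 = M * (ys.length / M) + (ys.length % M + 1) := by rw [Nat.mul_comm]; omega
          rw [h1, Nat.mul_add_div hM,
            Nat.div_eq_of_lt (show ys.length % M + 1 < M by omega), Nat.add_zero]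
        rw [hlen, hdiv]
        refine Prod.ext ?_ ?_
        · simp only
          apply List.map_congr_left
          intro k hk
          rw [List.mem_range] at hk
          exact (pv_chunk_snoc ys a M k (by
            have h2 : (k + 1) * M ≤ ys.length / M * M :=
              Nat.mul_le_mul_right _ (by omega)
            rw [Nat.add_mul, Nat.one_mul] at h2
            omega)).symm
        · simp only
          rw [List.drop_append_of_le_length (by omega)]

-- a map over range C whose tail from L on is empty is the first L entries plus padding
theorem pv_pad (C L : Nat) (hL : L ≤ C) (f : Nat → List String)
    (hf : ∀ k, L ≤ k → k < C → f k = []) :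
    (List.range C).map f = (List.range L).map f ++ List.replicate (C - L) [] := by
  have hC : C = L + (C - L) := by omega
  rw [hC, List.range_add, List.map_append, List.map_map]
  congr 1
  apply List.eq_replicate_iff.mpr
  refine ⟨by simp, ?_⟩
  intro b hb
  rw [List.mem_map] at hb
  obtain ⟨j, hj, hbj⟩ := hb
  rw [List.mem_range] at hj
  rw [← hbj]
  simp only [Function.comp]
  apply hf <;> omega

-- ===== VERDICT =====
theorem compute_clip_groups_spec : Claim_equal_compute_clip_groups := by
  intro xs c _
  unfold Spec_compute_clip_groups compute_clip_groups compute_clip_groups_alt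
  by_cases hc : c ≤ 0
  · simp [hc]
  · simp only [if_neg hc]
    rw [not_le] at hc
    have hmeq : (if xs = [] then 1
        else max 1 (-(PySem.Int.floordiv (-(xs.length : Int)) c)))
        = (if xs = [] then 1
        else PySem.Int.floordiv ((xs.length : Int) + c - 1) c) := by
      split
      · rfl
      · rename_i h
        exact pv_m_eq xs.length c (by
          have : xs.length ≠ 0 := fun h0 => h (List.eq_nil_of_length_eq_zero h0)
          omega) hc
    rw [hmeq]
    set m : Int := if xs = [] then 1 else PySem.Int.floordiv ((xs.length : Int) + c - 1) c with hmdef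
    have hm1 : 1 ≤ m := by
      rw [hmdef]; split
      · exact le_refl 1
      · rename_i h
        have hn : 1 ≤ xs.length := by
          have : xs.length ≠ 0 := fun h0 => h (List.eq_nil_of_length_eq_zero h0)
          omega
        have hspec : PySem.Int.floordiv ((xs.length : Int) + c - 1) c * c ≤ (xs.length : Int) + c - 1 ∧
            (xs.length : Int) + c - 1 < (PySem.Int.floordiv ((xs.length : Int) + c - 1) c + 1) * c := by
          rw [← PySem.Int.floordiv_eq_iff_of_pos hc]
        nlinarith [hspec.1, hspec.2]
    have hlenI : (xs.length : Int) ≤ c * m := by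
      by_cases h : xs = []
      · subst h; simp; nlinarith [hc, hm1]
      · have hmval : m = PySem.Int.floordiv ((xs.length : Int) + c - 1) c := by
          rw [hmdef, if_neg h]
        have hspec : m * c ≤ (xs.length : Int) + c - 1 ∧
            (xs.length : Int) + c - 1 < (m + 1) * c :=
          (PySem.Int.floordiv_eq_iff_of_pos hc).mp hmval.symm
        nlinarith [hspec.1, hspec.2]
    set M : Nat := m.toNat with hMdef
    have hmM : m = (M : Int) := by omega
    set C : Nat := c.toNat with hCdef
    have hcC : c = (C : Int) := by omega
    have hM : 0 < M := by omega
    have hlen : xs.length ≤ C * M := by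
      have : (xs.length : Int) ≤ (C : Int) * (M : Int) := by rw [← hmM, ← hcC]; exact hlenI
      exact_mod_cast this
    refine Prod.ext rfl ?_
    simp only
    rw [hmM, pv_fold M hM xs]
    simp only
    set q := xs.length / M with hq
    have hqm : q * M + xs.length % M = xs.length := by
      rw [hq, Nat.mul_comm]; exact Nat.div_add_mod xs.length M
    have hmod : xs.length % M < M := Nat.mod_lt xs.length hM
    have hremlen : (xs.drop (q * M)).length = xs.length % M := by
      rw [List.length_drop]; omega
    set chunk : Nat → List String := fun k => (xs.drop (k * M)).take M with hchunk
    set L : Nat := if xs.length % M = 0 then q else q + 1 with hL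
    have hgs : (if xs.drop (q * M) = [] then (List.range q).map chunk
        else (List.range q).map chunk ++ [xs.drop (q * M)]) = (List.range L).map chunk := by
      by_cases hr : xs.length % M = 0
      · rw [hL, if_pos hr, if_pos (by rw [← List.length_eq_zero_iff, hremlen]; exact hr)]
      · rw [hL, if_neg hr, if_neg (show ¬ xs.drop (q * M) = [] from fun hnil => by
          rw [hnil] at hremlen; simp at hremlen; omega)]
        rw [List.range_succ, List.map_append, List.map_cons, List.map_nil]
        congr 2
        rw [hchunk]
        simp only
        exact (List.take_of_length_le (by rw [hremlen]; omega)).symm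
    rw [hgs]
    have hLC : L ≤ C := by
      rw [hL]
      by_cases hr : xs.length % M = 0
      · rw [if_pos hr]
        exact Nat.le_of_mul_le_mul_right (by omega) hM
      · rw [if_neg hr]
        have h1 : q * M < C * M := by omega
        have := Nat.lt_of_mul_lt_mul_right h1
        omega
    have hpadlen : ((c - (((List.range L).map chunk).length : Int)).toNat) = C - L := by
      rw [List.length_map, List.length_range, hcC]; omega
    rw [hpadlen]
    rw [pv_foldl_append_map, PySem.List.pyRange_one, hcC]
    have hrange : (((C : Nat) : Int) - 0).toNat = C := by omega
    rw [hrange, List.map_map, List.nil_append]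
    have hmapped : (List.range C).map
        ((fun i => PySem.List.slice xs (some (i * (M : Int))) (some ((i + 1) * (M : Int)))) ∘
          (fun k : Nat => (0 : Int) + (k : Int))) = (List.range C).map chunk := by
      apply List.map_congr_left
      intro k hk
      simp only [Function.comp]
      have e1 : ((0 : Int) + (k : Int)) * ((M : Nat) : Int) = (((k * M : Nat) : Nat) : Int) := by
        push_cast; ring
      have e2 : ((0 : Int) + (k : Int) + 1) * ((M : Nat) : Int)
          = (((k * M : Nat) : Nat) : Int) + ((M : Nat) : Int) := by push_cast; ring
      rw [e1, e2, PySem.List.slice_natCast_add]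
    rw [hmapped]
    apply pv_pad C L hLC chunk
    intro k hkL hkC
    have hkM : xs.length ≤ k * M := by
      rw [hL] at hkL
      by_cases hr : xs.length % M = 0
      · rw [if_pos hr] at hkL
        have h2 : q * M ≤ k * M := Nat.mul_le_mul_right _ hkL
        omega
      · rw [if_neg hr] at hkL
        have h2 : (q + 1) * M ≤ k * M := Nat.mul_le_mul_right _ hkL
        rw [Nat.add_mul, Nat.one_mul] at h2
        omega
    rw [hchunk]
    simp only
    rw [List.drop_eq_nil_of_le hkM, List.take_nil]
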